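-- pv_equiv track=rewrite | github.com/bassil/advent_of_code | 2023/02/sol.py | part_1
-- ===== SOURCE A (Python) =====
-- def part_1(games, max_num_cubes):
--     result = 0
--     for game_number, game_results in games.items():
--         possible = True
--         for game_result in game_results:
--             for color, num_cubes in game_result.items():
--                 if num_cubes > max_num_cubes[color]:
--                     possible = False
--         if possible:
--             result += game_number
--     return result
-- ===== SOURCE B (Python) =====
-- def part_1(games, max_num_cubes):
--     total = 0
--     for game_number, game_results in games.items():
--         # pass 1: aggregate per-color maxima over all of this game's results
--         maxima = {}
--         for game_result in game_results:
--             for color, num_cubes in game_result.items():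
--                 if color not in maxima or num_cubes > maxima[color]:
--                     maxima[color] = num_cubes
--         # pass 2: the game is possible iff every per-color maximum fits
--         if all(num <= max_num_cubes[color] for color, num in maxima.items()):
--             total += game_number
--     return total
-- ===== Notes on version B (the rewrite author's own statement) =====
-- stated objective: alternative
-- what changed: B first aggregates each game's per-color maxima into a dict in one pass, then decides possibility by a separate check of the maxima against the limits, instead of A's inline per-entry comparison with a possible flag.
import Mathlib
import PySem

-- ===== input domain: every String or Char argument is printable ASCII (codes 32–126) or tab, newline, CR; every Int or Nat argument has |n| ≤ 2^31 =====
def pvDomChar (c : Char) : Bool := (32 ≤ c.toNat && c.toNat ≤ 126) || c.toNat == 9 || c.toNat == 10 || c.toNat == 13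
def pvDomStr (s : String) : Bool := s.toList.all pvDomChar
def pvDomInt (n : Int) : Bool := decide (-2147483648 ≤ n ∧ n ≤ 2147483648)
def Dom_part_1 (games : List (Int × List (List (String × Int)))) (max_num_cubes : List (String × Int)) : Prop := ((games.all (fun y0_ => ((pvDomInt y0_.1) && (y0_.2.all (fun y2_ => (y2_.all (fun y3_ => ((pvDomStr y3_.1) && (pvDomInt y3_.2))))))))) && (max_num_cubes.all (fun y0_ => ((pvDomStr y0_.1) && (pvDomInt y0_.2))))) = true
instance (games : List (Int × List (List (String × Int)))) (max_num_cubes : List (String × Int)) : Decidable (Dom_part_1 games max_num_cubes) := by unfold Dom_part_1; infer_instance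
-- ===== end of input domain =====

-- B replaces A's inline per-entry comparison (with a 'possible' flag) by an aggregate-then-check
-- decomposition: one pass builds a per-color maxima dict, a second pass compares the maxima to the
-- limits (objective: alternative decomposition, same cost).

-- max_num_cubes[color]: first-match association-list lookup (total here; Pre_ guarantees a match)
def pvLook (max_num_cubes : List (String × Int)) (c : String) : Int :=
  ((max_num_cubes.find? (fun p => p.1 == c)).map (·.2)).getD 0

-- ===== PORT A =====
def part_1 (games : List (Int × List (List (String × Int)))) (max_num_cubes : List (String × Int)) : Int :=
  games.foldl (fun result g =>
    let possible := g.2.foldl (fun p game_result =>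
      game_result.foldl (fun p cn =>
        if cn.2 > pvLook max_num_cubes cn.1 then false else p) p) true
    if possible then result + g.1 else result) 0

-- ===== PORT B =====
def part_1_alt (games : List (Int × List (List (String × Int)))) (max_num_cubes : List (String × Int)) : Int :=
  games.foldl (fun total g =>
    let maxima : PySem.Dict String Int := g.2.foldl (fun m game_result =>
      game_result.foldl (fun (m : PySem.Dict String Int) cn =>
        if !m.contains cn.1 || cn.2 > m.getD cn.1 0 then m.insert cn.1 cn.2 else m) m)
      PySem.Dict.empty
    if maxima.items.all (fun cv => decide (cv.2 ≤ pvLook max_num_cubes cv.1)) then total + g.1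
    else total) 0

-- ===== PRECONDITION & SPEC =====
-- Pre_ excludes exactly the inputs on which Python A raises KeyError: some color that occurs in a
-- game's results has no entry in max_num_cubes.
def Pre_part_1 (games : List (Int × List (List (String × Int)))) (max_num_cubes : List (String × Int)) : Prop :=
  ∀ g ∈ games, ∀ gr ∈ g.2, ∀ cn ∈ gr, cn.1 ∈ max_num_cubes.map (·.1)
instance (games : List (Int × List (List (String × Int)))) (max_num_cubes : List (String × Int)) : Decidable (Pre_part_1 games max_num_cubes) := by unfold Pre_part_1; infer_instance
def pvWitness_part_1 : (List (Int × List (List (String × Int)))) × (List (String × Int)) :=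
  ([(1, [[("red", 3), ("blue", 2)], [("red", 5)]]), (2, [[("blue", 9)]])], [("red", 6), ("blue", 4)])
def Spec_part_1 (games : List (Int × List (List (String × Int)))) (max_num_cubes : List (String × Int)) (out : Int) : Prop := out = part_1_alt games max_num_cubes
instance (games : List (Int × List (List (String × Int)))) (max_num_cubes : List (String × Int)) (out : Int) : Decidable (Spec_part_1 games max_num_cubes out) := by unfold Spec_part_1; infer_instance

-- ===== CLAIM (what is proved, stated in full; the proofs are below) =====
def Claim_equal_part_1 : Prop := ∀ (games : List (Int × List (List (String × Int)))) (max_num_cubes : List (String × Int)), Dom_part_1 games max_num_cubes → Pre_part_1 games max_num_cubes → Spec_part_1 games max_num_cubes (part_1 games max_num_cubes)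

-- ===== LEMMAS AND PROOFS =====

-- A's flag fold over one entry list computes 'no entry exceeds its limit' (conjoined with the start)
theorem flagFold (M : List (String × Int)) (es : List (String × Int)) (p : Bool) :
    es.foldl (fun p cn => if cn.2 > pvLook M cn.1 then false else p) p
      = (p && es.all (fun cn => decide (cn.2 ≤ pvLook M cn.1))) := by
  induction es generalizing p with
  | nil => simp
  | cons e es ih =>
    simp only [List.foldl_cons, List.all_cons, ih]
    by_cases h : e.2 > pvLook M e.1
    · simp [h, not_le.mpr h]
    · simp [h, not_lt.mp h]

-- B's maxima-build step: "every stored maximum fits" absorbs one new entry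
theorem stepAll (M : List (String × Int)) (m : PySem.Dict String Int) (hm : m.keys.Nodup)
    (cn : String × Int) :
    ((if !m.contains cn.1 || cn.2 > m.getD cn.1 0 then m.insert cn.1 cn.2 else m).items.all
        (fun cv => decide (cv.2 ≤ pvLook M cv.1)))
      = (m.items.all (fun cv => decide (cv.2 ≤ pvLook M cv.1))
          && decide (cn.2 ≤ pvLook M cn.1)) := by
  obtain ⟨c, n⟩ := cn
  by_cases hc : m.contains c
  · have hmem : (c, m.getD c 0) ∈ m.items := by
      rcases h : m.get? c with _ | v
      · rw [PySem.Dict.contains_eq_isSome_get?, h] at hc; simp at hc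
      · rw [PySem.Dict.getD_of_get?_eq_some m 0 h]
        exact PySem.Dict.mem_items_of_get?_eq_some m h
    by_cases hn : n > m.getD c 0
    · simp only [hc, hn]
      simp only [Bool.not_true, Bool.false_or, decide_true, if_pos]
      rw [Bool.eq_iff_iff]
      simp only [List.all_eq_true, Bool.and_eq_true, decide_eq_true_iff]
      constructor
      · intro h
        have hcn := h (c, n) (PySem.Dict.mem_items_insert_self m c n)
        refine ⟨fun p hp => ?_, hcn⟩
        by_cases hpc : p.1 = c
        · obtain ⟨p1, p2⟩ := p; simp only at hpc; subst hpc
          have : p2 = m.getD p1 0 := (PySem.Dict.getD_of_mem_items m hp hm 0).symm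
          subst this; exact le_trans (le_of_lt hn) hcn
        · exact h p ((PySem.Dict.mem_items_insert m c n p).mpr (Or.inr ⟨hp, hpc⟩))
      · rintro ⟨h, hcn⟩ p hp
        rcases (PySem.Dict.mem_items_insert m c n p).mp hp with rfl | ⟨hp, _⟩
        · exact hcn
        · exact h p hp
    · simp only [hc, hn]
      simp only [Bool.not_true, Bool.false_or, decide_false, if_neg Bool.false_ne_true]
      rw [Bool.eq_iff_iff]
      simp only [List.all_eq_true, Bool.and_eq_true, decide_eq_true_iff]
      constructor
      · intro h
        exact ⟨h, le_trans (not_lt.mp hn) (h _ hmem)⟩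
      · exact fun h => h.1
  · simp only [hc]
    simp only [Bool.not_false, Bool.true_or, if_pos]
    rw [Bool.eq_iff_iff]
    simp only [List.all_eq_true, Bool.and_eq_true, decide_eq_true_iff]
    constructor
    · intro h
      refine ⟨fun p hp => ?_, h _ (PySem.Dict.mem_items_insert_self m c n)⟩
      have hpc : p.1 ≠ c := by
        intro he
        have : m.contains p.1 = true :=
          (PySem.Dict.contains_iff_mem_keys m p.1).mpr (PySem.Dict.mem_keys_of_mem_items m hp)
        rw [he] at this; simp [hc] at this
      exact h p ((PySem.Dict.mem_items_insert m c n p).mpr (Or.inr ⟨hp, hpc⟩))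
    · rintro ⟨h, hcn⟩ p hp
      rcases (PySem.Dict.mem_items_insert m c n p).mp hp with rfl | ⟨hp, _⟩
      · exact hcn
      · exact h p hp

-- B's maxima-build step preserves nodup keys
theorem stepNodup (m : PySem.Dict String Int) (hm : m.keys.Nodup) (cn : String × Int) :
    ((if !m.contains cn.1 || cn.2 > m.getD cn.1 0 then m.insert cn.1 cn.2 else m) :
      PySem.Dict String Int).keys.Nodup := by
  split
  · exact PySem.Dict.nodup_keys_insert _ _ _ hm
  · exact hm

-- fold over one entry list, B side
theorem maximaFold (M : List (String × Int)) (es : List (String × Int))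
    (m : PySem.Dict String Int) (hm : m.keys.Nodup) :
    ((es.foldl (fun (m : PySem.Dict String Int) cn =>
        if !m.contains cn.1 || cn.2 > m.getD cn.1 0 then m.insert cn.1 cn.2 else m) m).items.all
        (fun cv => decide (cv.2 ≤ pvLook M cv.1)))
      = (m.items.all (fun cv => decide (cv.2 ≤ pvLook M cv.1))
          && es.all (fun cn => decide (cn.2 ≤ pvLook M cn.1))) := by
  induction es generalizing m with
  | nil => simp
  | cons e es ih =>
    simp only [List.foldl_cons, List.all_cons]
    rw [ih _ (stepNodup m hm e), stepAll M m hm e, Bool.and_assoc]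

-- nodup keys through one entry list (inner fold)
theorem innerNodup (es : List (String × Int)) (m : PySem.Dict String Int) (hm : m.keys.Nodup) :
    ((es.foldl (fun (m : PySem.Dict String Int) cn =>
        if !m.contains cn.1 || cn.2 > m.getD cn.1 0 then m.insert cn.1 cn.2 else m) m)).keys.Nodup := by
  induction es generalizing m with
  | nil => exact hm
  | cons e es ih => exact ih _ (stepNodup m hm e)

-- A side, whole game: the flag fold over all result lists
theorem flagFoldOuter (M : List (String × Int)) (grs : List (List (String × Int))) (p : Bool) :
    (grs.foldl (fun p gr => gr.foldl (fun p cn =>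
        if cn.2 > pvLook M cn.1 then false else p) p) p)
      = (p && grs.all (fun gr => gr.all (fun cn => decide (cn.2 ≤ pvLook M cn.1)))) := by
  induction grs generalizing p with
  | nil => simp
  | cons gr grs ih =>
    rw [List.foldl_cons, ih, flagFold, List.all_cons, Bool.and_assoc]

-- B side, whole game: the maxima check over all result lists
theorem maximaOuter (M : List (String × Int)) (grs : List (List (String × Int)))
    (m : PySem.Dict String Int) (hm : m.keys.Nodup) :
    ((grs.foldl (fun m gr => gr.foldl (fun (m : PySem.Dict String Int) cn =>
        if !m.contains cn.1 || cn.2 > m.getD cn.1 0 then m.insert cn.1 cn.2 else m) m) m).items.all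
        (fun cv => decide (cv.2 ≤ pvLook M cv.1)))
      = (m.items.all (fun cv => decide (cv.2 ≤ pvLook M cv.1))
          && grs.all (fun gr => gr.all (fun cn => decide (cn.2 ≤ pvLook M cn.1)))) := by
  induction grs generalizing m with
  | nil => simp
  | cons gr grs ih =>
    rw [List.foldl_cons, ih _ (innerNodup gr m hm), maximaFold M gr m hm, List.all_cons,
      Bool.and_assoc]

-- per game, both sides compute the same possibility bool
theorem perGame (M : List (String × Int)) (grs : List (List (String × Int))) :
    (grs.foldl (fun p gr => gr.foldl (fun p cn =>
        if cn.2 > pvLook M cn.1 then false else p) p) true)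
      = ((grs.foldl (fun m gr => gr.foldl (fun (m : PySem.Dict String Int) cn =>
          if !m.contains cn.1 || cn.2 > m.getD cn.1 0 then m.insert cn.1 cn.2 else m) m)
          PySem.Dict.empty).items.all (fun cv => decide (cv.2 ≤ pvLook M cv.1))) := by
  rw [flagFoldOuter, maximaOuter M grs PySem.Dict.empty PySem.Dict.nodup_keys_empty]
  rfl

-- both outer folds agree for any accumulator
theorem outerEq (M : List (String × Int)) (games : List (Int × List (List (String × Int))))
    (acc : Int) :
    (games.foldl (fun result g =>
      let possible := g.2.foldl (fun p game_result =>
        game_result.foldl (fun p cn =>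
          if cn.2 > pvLook M cn.1 then false else p) p) true
      if possible then result + g.1 else result) acc)
      = (games.foldl (fun total g =>
        let maxima : PySem.Dict String Int := g.2.foldl (fun m game_result =>
          game_result.foldl (fun (m : PySem.Dict String Int) cn =>
            if !m.contains cn.1 || cn.2 > m.getD cn.1 0 then m.insert cn.1 cn.2 else m) m)
          PySem.Dict.empty
        if maxima.items.all (fun cv => decide (cv.2 ≤ pvLook M cv.1)) then total + g.1
        else total) acc) := by
  induction games generalizing acc with
  | nil => rfl
  | cons g games ih =>
    simp only [List.foldl_cons]
    rw [perGame M g.2]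
    exact ih _

-- ===== VERDICT (by name: the statement is the Claim_ definition above) =====
theorem part_1_spec : Claim_equal_part_1 := by
  intro games M _ _
  unfold Spec_part_1 part_1 part_1_alt
  exact outerEq M games 0
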